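-- pv_equiv track=rewrite | github.com/garychuvscode/test_record | parameter_load_obj.py | get_nth_key
-- ===== SOURCE A (Python) =====
-- def get_nth_key(dictionary, n=0):
--
--     if n < 0:
--         n += len(dictionary)
--     for i, key in enumerate(dictionary.keys()):
--         if i == n:
--             return key
--     raise IndexError("dictionary index out of range")
--
--     pass
-- ===== SOURCE B (Python) =====
-- def get_nth_key(dictionary, n=0):
--     keys = list(dictionary.keys())
--     if n < 0:
--         n += len(keys)
--     if 0 <= n < len(keys):
--         return keys[n]
--     raise IndexError("dictionary index out of range")
-- ===== Notes on version B (the rewrite author's own statement) =====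
-- stated objective: simpler
-- what changed: B materialises the key list once and indexes it directly after a bound check, replacing A's enumerate-and-scan loop over the keys view.
import Mathlib
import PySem

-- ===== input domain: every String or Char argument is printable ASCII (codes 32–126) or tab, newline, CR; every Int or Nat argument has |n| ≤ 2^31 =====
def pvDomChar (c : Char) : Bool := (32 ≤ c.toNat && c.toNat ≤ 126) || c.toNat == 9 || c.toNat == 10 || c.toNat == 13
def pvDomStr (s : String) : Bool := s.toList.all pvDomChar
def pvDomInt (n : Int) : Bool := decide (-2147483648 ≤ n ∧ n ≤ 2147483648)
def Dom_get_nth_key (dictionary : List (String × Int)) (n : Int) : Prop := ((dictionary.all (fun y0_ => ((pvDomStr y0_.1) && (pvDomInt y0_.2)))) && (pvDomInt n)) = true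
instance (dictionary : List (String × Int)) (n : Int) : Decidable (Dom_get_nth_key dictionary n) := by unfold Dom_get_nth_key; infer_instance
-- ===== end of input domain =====

-- ===== PORT A =====
-- B replaces A's enumerate-and-scan loop with a bound check and direct indexing (objective: simpler).
-- Pre_ excludes exactly the inputs on which A raises IndexError (adjusted index out of range).

-- A's `for i, key in enumerate(dictionary.keys()): if i == n: return key`
def get_nth_key_loop (n : Int) : Nat → List String → String
  | _, [] => ""                 -- loop falls through: Python raises IndexError (excluded by Pre_)
  | i, key :: rest => if (i : Int) = n then key else get_nth_key_loop n (i + 1) rest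

def get_nth_key (dictionary : List (String × Int)) (n : Int) : String :=
  let n' := if n < 0 then n + ((PySem.Dict.ofList dictionary).keys).length else n
  get_nth_key_loop n' 0 ((PySem.Dict.ofList dictionary).keys)

-- ===== PORT B =====
def get_nth_key_alt (dictionary : List (String × Int)) (n : Int) : String :=
  let keys := (PySem.Dict.ofList dictionary).keys
  let n' := if n < 0 then n + keys.length else n
  if 0 ≤ n' ∧ n' < keys.length then keys[n'.toNat]!
  else ""                       -- Python raises IndexError here (excluded by Pre_)

-- ===== PRECONDITION & SPEC =====
-- Pre_: the (negatively adjusted) index hits a distinct key; otherwise both Pythons raise IndexError.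
def Pre_get_nth_key (dictionary : List (String × Int)) (n : Int) : Prop :=
  let m := ((PySem.Dict.ofList dictionary).keys).length
  0 ≤ (if n < 0 then n + m else n) ∧ (if n < 0 then n + m else n) < m
instance (dictionary : List (String × Int)) (n : Int) : Decidable (Pre_get_nth_key dictionary n) := by
  unfold Pre_get_nth_key; infer_instance

def pvWitness_get_nth_key : (List (String × Int)) × Int := ([("a", 1), ("b", 2)], -1)

def Spec_get_nth_key (dictionary : List (String × Int)) (n : Int) (out : String) : Prop := out = get_nth_key_alt dictionary n
instance (dictionary : List (String × Int)) (n : Int) (out : String) : Decidable (Spec_get_nth_key dictionary n out) := by unfold Spec_get_nth_key; infer_instance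

-- ===== CLAIM (what is proved, stated in full; the proofs are below) =====
def Claim_equal_get_nth_key : Prop := ∀ (dictionary : List (String × Int)) (n : Int), Dom_get_nth_key dictionary n → Pre_get_nth_key dictionary n → Spec_get_nth_key dictionary n (get_nth_key dictionary n)

-- ===== LEMMAS AND PROOFS =====

theorem get_nth_key_loop_eq (keys : List String) (i : Nat) (n : Int)
    (h1 : (i : Int) ≤ n) (h2 : n < (i : Int) + keys.length) :
    get_nth_key_loop n i keys = keys[(n - i).toNat]! := by
  induction keys generalizing i with
  | nil => simp at h2; omega
  | cons k rest ih =>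
    simp only [get_nth_key_loop]
    by_cases h : (i : Int) = n
    · rw [if_pos h]
      have h0 : (n - i).toNat = 0 := by omega
      simp [h0]
    · have h2' : n < ((i + 1 : Nat) : Int) + rest.length := by
        simp only [List.length_cons] at h2; push_cast at h2 ⊢; omega
      rw [if_neg h, ih (i + 1) (by push_cast; omega) h2']
      have hk : (n - (i : Int)).toNat = (n - ((i + 1 : Nat) : Int)).toNat + 1 := by
        push_cast; omega
      simp [hk]

-- ===== VERDICT (by name: the statement is the Claim_ definition above) =====
theorem get_nth_key_spec : Claim_equal_get_nth_key := by
  intro d n _ hpre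
  unfold Pre_get_nth_key at hpre
  unfold Spec_get_nth_key get_nth_key get_nth_key_alt
  set m := (PySem.Dict.ofList d).keys.length with hm
  set n' := if n < 0 then n + (m : Int) else n with hn'
  obtain ⟨h1, h2⟩ := hpre
  rw [if_pos ⟨h1, h2⟩]
  rw [get_nth_key_loop_eq _ 0 _ (by exact_mod_cast h1) (by simpa using h2)]
  norm_num
  simp [hn', hm]
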